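-- pv_equiv track=rewrite | github.com/wmohamed24/PolicyResearch | createTrain.py | breakSentence
-- ===== SOURCE A (Python) =====
-- def breakSentence(txtData):
--     '''
--     breakes the txt file into sentences and each sentence has a starting and ending letter
--     Note: not the optimum way of breakingdown the sentences. The mapping of sentences and begin/end letter
--     needs to match that of the mapping in the annotations
--     '''
--
--     sentences, s2char = list(), list()
--     holdString, begin, end = '', 1, 1
--
--     for letter in txtData:
--         holdString += letter
--         if letter == '.':
--             sentences.append(holdString)
--             holdString = ''
--             s2char.append((begin, end))
--             begin = end+1
--             end = begin-1
--         end += 1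
--     return sentences, s2char
-- ===== SOURCE B (Python) =====
-- def breakSentence(txtData):
--     '''Linear pass: record '.' positions and slice the original text; offsets
--     derived from the index instead of running begin/end counters.'''
--     sentences, s2char = [], []
--     prev = 0
--     for i, letter in enumerate(txtData):
--         if letter == '.':
--             sentences.append(txtData[prev:i + 1])
--             s2char.append((prev + 1, i + 1))
--             prev = i + 1
--     return sentences, s2char
-- ===== Notes on version B (the rewrite author's own statement) =====
-- stated objective: faster
-- what changed: B drops A's incremental holdString and begin/end counter bookkeeping: one pass over enumerate records the dot positions, slices the original text for each sentence and derives both offsets directly from the index.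
import Mathlib
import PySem

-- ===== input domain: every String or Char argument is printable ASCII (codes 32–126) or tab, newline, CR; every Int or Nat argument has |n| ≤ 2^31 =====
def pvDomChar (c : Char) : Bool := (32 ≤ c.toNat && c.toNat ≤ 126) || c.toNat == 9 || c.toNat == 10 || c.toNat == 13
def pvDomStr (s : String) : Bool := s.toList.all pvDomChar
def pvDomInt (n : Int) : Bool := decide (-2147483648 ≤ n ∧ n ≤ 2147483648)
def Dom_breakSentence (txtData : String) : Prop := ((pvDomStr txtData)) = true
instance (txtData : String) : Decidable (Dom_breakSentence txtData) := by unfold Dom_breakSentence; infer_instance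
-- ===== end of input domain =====

-- B replaces A's incremental holdString/begin/end bookkeeping by one pass over enumerate that
-- slices the text at the dot positions and derives the offsets from the index (objective: faster).

-- ===== PORT A =====
-- strings are handled as List Char per the PySem convention; 'holdString += letter' is 'hold ++ [c]'
def breakSentenceGoA : List Char → List String → List (Int × Int) → List Char → Int → Int →
    List String × (List (Int × Int))
  | [], ss, sc, _, _, _ => (ss, sc)
  | c :: rest, ss, sc, hold, b, e =>
    let hold := hold ++ [c]
    if c = '.' then
      let ss := ss ++ [String.ofList hold]
      let sc := sc ++ [(b, e)]
      let b := e + 1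
      let e := b - 1
      breakSentenceGoA rest ss sc [] b (e + 1)
    else
      breakSentenceGoA rest ss sc hold b (e + 1)

def breakSentence (txtData : String) : List String × (List (Int × Int)) :=
  breakSentenceGoA txtData.toList [] [] [] 1 1

-- ===== PORT B =====
-- loop body of B: state (sentences, s2char, prev); txtData[prev:i+1] is PySem.List.slice
def breakSentenceStepB (cs : List Char) (st : List String × (List (Int × Int)) × Int)
    (ic : Int × Char) : List String × (List (Int × Int)) × Int :=
  let (ss, sc, prev) := st
  if ic.2 = '.' then
    (ss ++ [String.ofList (PySem.List.slice cs (some prev) (some (ic.1 + 1)))],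
     sc ++ [(prev + 1, ic.1 + 1)], ic.1 + 1)
  else
    (ss, sc, prev)

def breakSentence_alt (txtData : String) : List String × (List (Int × Int)) :=
  let cs := txtData.toList
  let st := (PySem.List.enumerate cs 0).foldl (breakSentenceStepB cs) ([], [], 0)
  (st.1, st.2.1)

-- ===== PRECONDITION & SPEC =====
def Spec_breakSentence (txtData : String) (out : List String × (List (Int × Int))) : Prop := out = breakSentence_alt txtData
instance (txtData : String) (out : List String × (List (Int × Int))) : Decidable (Spec_breakSentence txtData out) := by unfold Spec_breakSentence; infer_instance

-- ===== CLAIM (what is proved, stated in full; the proofs are below) =====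
def Claim_equal_breakSentence : Prop := ∀ (txtData : String), Dom_breakSentence txtData → Spec_breakSentence txtData (breakSentence txtData)

-- ===== LEMMAS AND PROOFS =====

-- loop invariant: after k characters, A's holdString is the slice of the text from the last dot
-- (position p) to k, begin = p+1, end = k+1; B's state carries prev = p.
theorem breakSentence_loop (cs : List Char) :
    ∀ (rest : List Char) (k p : Nat) (ss : List String) (sc : List (Int × Int)),
      p ≤ k → cs.drop k = rest →
      breakSentenceGoA rest ss sc ((cs.drop p).take (k - p)) ((p : Int) + 1) ((k : Int) + 1)
        = (let st := (PySem.List.enumerate rest (k : Int)).foldl (breakSentenceStepB cs) (ss, sc, (p : Int))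
           (st.1, st.2.1)) := by
  intro rest
  induction rest with
  | nil => intro k p ss sc hpk hdrop; simp [breakSentenceGoA, PySem.List.enumerate]
  | cons c rest ih =>
    intro k p ss sc hpk hdrop
    have hk : k < cs.length := by
      by_contra h
      simp [List.drop_eq_nil_of_le (Nat.le_of_not_lt h)] at hdrop
    have hck : cs[k] = c := by
      have h0 : (cs.drop k)[0]'(by simp [hdrop]) = c := by simp [hdrop]
      simpa using h0
    have hdrop1 : cs.drop (k + 1) = rest := by
      have : cs.drop (k + 1) = (cs.drop k).drop 1 := by
        rw [List.drop_drop]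
      simp [this, hdrop]
    have htake : (cs.drop p).take (k - p) ++ [c] = (cs.drop p).take (k + 1 - p) := by
      have hlen : k - p < (cs.drop p).length := by
        simp [List.length_drop]; omega
      have hget : (cs.drop p)[k - p]'hlen = c := by
        rw [List.getElem_drop]
        have : p + (k - p) = k := by omega
        simp [this, hck]
      have : (cs.drop p).take (k - p + 1) = (cs.drop p).take (k - p) ++ [(cs.drop p)[k - p]'hlen] := by
        rw [List.take_add_one, List.getElem?_eq_getElem hlen]
        simp
      rw [show k + 1 - p = k - p + 1 by omega, this, hget]
    have hslice : PySem.List.slice cs (some (p : Int)) (some ((k : Int) + 1))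
        = (cs.drop p).take (k + 1 - p) := by
      have := PySem.List.slice_toNat cs (a := (p : Int)) (b := (k : Int) + 1) (by positivity) (by positivity)
      rw [this, show ((k : Int) + 1).toNat = k + 1 from by omega,
          show ((p : Int)).toNat = p from by omega]
    rw [PySem.List.enumerate_cons]
    by_cases hc : c = '.'
    · subst hc
      simp only [breakSentenceGoA, List.foldl_cons]
      have hstep : breakSentenceStepB cs (ss, sc, (p : Int)) ((k : Int), '.')
          = (ss ++ [String.ofList ((cs.drop p).take (k - p) ++ ['.'])],
             sc ++ [((p : Int) + 1, (k : Int) + 1)], (k : Int) + 1) := by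
        simp [breakSentenceStepB, hslice, htake]
      rw [hstep]
      have := ih (k + 1) (k + 1) (ss ++ [String.ofList ((cs.drop p).take (k - p) ++ ['.'])])
        (sc ++ [((p : Int) + 1, (k : Int) + 1)]) (le_refl _) hdrop1
      simp only [Nat.sub_self, List.take_zero] at this
      rw [show ((k : Int) + 1 + 1 - 1 + 1) = ((k + 1 : Nat) : Int) + 1 by push_cast; ring,
          show ((k : Int) + 1) = ((k + 1 : Nat) : Int) by push_cast; ring] at *
      exact this
    · simp only [breakSentenceGoA, if_neg hc, List.foldl_cons]
      have hstep : breakSentenceStepB cs (ss, sc, (p : Int)) ((k : Int), c) = (ss, sc, (p : Int)) := by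
        simp [breakSentenceStepB, hc]
      rw [hstep]
      have := ih (k + 1) p ss sc (by omega) hdrop1
      rw [htake] at *
      rw [show ((k : Int) + 1 + 1) = ((k + 1 : Nat) : Int) + 1 by push_cast; ring,
          show ((k : Int) + 1) = ((k + 1 : Nat) : Int) by push_cast; ring] at *
      exact this

-- ===== VERDICT (by name: the statement is the Claim_ definition above) =====
theorem breakSentence_spec : Claim_equal_breakSentence := by
  intro txtData _
  unfold Spec_breakSentence breakSentence breakSentence_alt
  have := breakSentence_loop txtData.toList txtData.toList 0 0 [] [] (le_refl 0) (by simp)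
  simpa using this
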